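-- pv_equiv track=rewrite | github.com/charonstr/flux | core/casino/roulette.py | _is_valid_corner
-- ===== SOURCE A (Python) =====
-- from typing import Any
--
-- ROULETTE_VARIANT = "EU"
--
-- def _normalize_num(n: Any) -> str:
--     s = str(n).strip()
--     if s == "00" and ROULETTE_VARIANT == "US":
--         return s
--     if s.isdigit() and 0 <= int(s) <= 36:
--         return str(int(s))
--     return ""
--
-- def _is_valid_corner(selection: list[str]) -> bool:
--     if len(selection) != 4:
--         return False
--     vals = sorted(int(_normalize_num(s) or -1) for s in selection)
--     if vals[0] < 1:
--         return False
--     candidates = [vals[0], vals[0] + 1, vals[0] + 3, vals[0] + 4]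
--     return vals == candidates and vals[0] % 3 in {1, 2}
-- ===== SOURCE B (Python) =====
-- from typing import Any
--
-- ROULETTE_VARIANT = "EU"
--
-- def _normalize_num(n: Any) -> str:
--     s = str(n).strip()
--     if s == "00" and ROULETTE_VARIANT == "US":
--         return s
--     if s.isdigit() and 0 <= int(s) <= 36:
--         return str(int(s))
--     return ""
--
-- def _is_valid_corner(selection: list[str]) -> bool:
--     if len(selection) != 4:
--         return False
--     nums = set()
--     for s in selection:
--         t = _normalize_num(s)
--         if not t:
--             return False
--         n = int(t)
--         if n < 1:
--             return False
--         nums.add(n)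
--     if len(nums) != 4:
--         return False
--     # geometric 2x2-block check on the 0-based grid: n -> (row, col) = divmod(n - 1, 3)
--     r = min((n - 1) // 3 for n in nums)
--     c = min((n - 1) % 3 for n in nums)
--     return c != 2 and all(3 * (r + dr) + (c + dc) + 1 in nums
--                           for dr in (0, 1) for dc in (0, 1))
-- ===== Notes on version B (the rewrite author's own statement) =====
-- stated objective: alternative
-- what changed: A sorts the four normalized values and compares the sorted list to an arithmetic candidate pattern [v, v+1, v+3, v+4]; B instead collects the values into a set with early rejection, maps each n to grid coordinates ((n-1)//3, (n-1)%3) and checks geometrically that the four distinct cells form a 2x2 block anchored away from the rightmost column.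
import Mathlib
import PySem

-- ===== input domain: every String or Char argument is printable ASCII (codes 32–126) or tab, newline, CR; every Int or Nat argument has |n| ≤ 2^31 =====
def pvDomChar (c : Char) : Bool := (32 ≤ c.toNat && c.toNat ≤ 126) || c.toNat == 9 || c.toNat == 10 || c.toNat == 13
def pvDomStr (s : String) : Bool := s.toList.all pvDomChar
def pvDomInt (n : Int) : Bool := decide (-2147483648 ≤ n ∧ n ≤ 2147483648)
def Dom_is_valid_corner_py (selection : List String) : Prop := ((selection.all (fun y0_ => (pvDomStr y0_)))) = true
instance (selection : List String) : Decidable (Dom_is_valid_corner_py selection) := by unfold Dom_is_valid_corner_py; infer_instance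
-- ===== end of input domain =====

-- B replaces A's sort + arithmetic-candidate comparison by a geometric 2x2-block check on
-- the roulette grid (objective: alternative decomposition, same cost).

-- ===== PORT A =====
def ROULETTE_VARIANT : String := "EU"

-- port of _normalize_num (the argument is always a str here, so str(n) = n)
def normalize_num (n : String) : String :=
  let s := PySem.Str.strip n
  if s = "00" ∧ ROULETTE_VARIANT = "US" then s
  else if PySem.Str.strIsdigit s then
    match PySem.Int.ofStr? s with  -- int(s); never raises: s.isdigit() holds
    | some k => if 0 ≤ k ∧ k ≤ 36 then PySem.Int.toStr k else ""
    | none => ""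
  else ""

def is_valid_corner_py (selection : List String) : Bool :=
  if selection.length ≠ 4 then false
  else
    let vals := PySem.List.sorted
      (selection.map (fun s =>
        let t := normalize_num s
        -- int(_normalize_num(s) or -1); the getD default is unreachable: t is str(int(..))
        if t = "" then -1 else (PySem.Int.ofStr? t).getD (-1)))
      (fun x => x) false
    let v0 := PySem.List.pyGetD vals 0 0  -- vals[0]; in range: length = 4
    if v0 < 1 then false
    else decide (vals = [v0, v0 + 1, v0 + 3, v0 + 4]) &&
         decide (PySem.Int.mod v0 3 = 1 ∨ PySem.Int.mod v0 3 = 2)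

-- ===== PORT B =====
-- the for-loop of Source B with its early returns (None = an early `return False`)
def collectNums : List String → PySem.Set Int → Option (PySem.Set Int)
  | [], nums => some nums
  | s :: rest, nums =>
    let t := normalize_num s
    if t = "" then none
    else
      let n := (PySem.Int.ofStr? t).getD (-1)  -- int(t); getD default unreachable: t is str(int(..))
      if n < 1 then none
      else collectNums rest (PySem.Set.add nums n)

def is_valid_corner_py_alt (selection : List String) : Bool :=
  if selection.length ≠ 4 then false
  else
    match collectNums selection PySem.Set.empty with
    | none => false
    | some nums =>
      if PySem.Set.len nums ≠ 4 then false
      else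
        let r := (PySem.List.min? (nums.map fun n => PySem.Int.floordiv (n - 1) 3) (fun x => x)).getD 0
        let c := (PySem.List.min? (nums.map fun n => PySem.Int.mod (n - 1) 3) (fun x => x)).getD 0
        decide (c ≠ 2) &&
          ([((0:Int),(0:Int)), (0,1), (1,0), (1,1)].all fun p =>
            PySem.Set.contains nums (3 * (r + p.1) + (c + p.2) + 1))

-- ===== PRECONDITION & SPEC =====
def Spec_is_valid_corner_py (selection : List String) (out : Bool) : Prop := out = is_valid_corner_py_alt selection
instance (selection : List String) (out : Bool) : Decidable (Spec_is_valid_corner_py selection out) := by unfold Spec_is_valid_corner_py; infer_instance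

-- ===== CLAIM (what is proved, stated in full; the proofs are below) =====
def Claim_equal_is_valid_corner_py : Prop := ∀ (selection : List String), Dom_is_valid_corner_py selection → Spec_is_valid_corner_py selection (is_valid_corner_py selection)

-- ===== LEMMAS AND PROOFS =====

-- the integer A associates to a selection entry: int(_normalize_num(s) or -1)
def vfun (s : String) : Int :=
  let t := normalize_num s
  if t = "" then -1 else (PySem.Int.ofStr? t).getD (-1)

theorem map_vfun (l : List String) :
    l.map (fun s =>
      let t := normalize_num s
      if t = "" then (-1 : Int) else (PySem.Int.ofStr? t).getD (-1)) = l.map vfun := rfl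

theorem collect_step (s : String) (rest : List String) (acc : PySem.Set Int) :
    collectNums (s :: rest) acc =
      if vfun s < 1 then none else collectNums rest (PySem.Set.add acc (vfun s)) := by
  rw [collectNums]
  by_cases h : normalize_num s = ""
  · simp only [vfun, h, reduceIte]
    norm_num
  · simp only [vfun, h, reduceIte]

theorem collect4 (s0 s1 s2 s3 : String) :
    collectNums [s0, s1, s2, s3] PySem.Set.empty =
      if vfun s0 < 1 ∨ vfun s1 < 1 ∨ vfun s2 < 1 ∨ vfun s3 < 1 then none
      else some (PySem.Set.ofList [vfun s0, vfun s1, vfun s2, vfun s3]) := by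
  rw [collect_step, collect_step, collect_step, collect_step, collectNums]
  split_ifs <;> first | omega | (rw [PySem.Set.ofList_eq_foldl]; simp only [List.foldl]; rfl) | rfl

-- the common characterisation: the four values are a permutation of {m, m+1, m+3, m+4}
-- for some m ≥ 1 with m % 3 ∈ {1, 2}
def CornerOf (V : List Int) : Prop :=
  ∃ m : Int, 1 ≤ m ∧ (PySem.Int.mod m 3 = 1 ∨ PySem.Int.mod m 3 = 2) ∧
    V.Perm [m, m + 1, m + 3, m + 4]

theorem cornerOf_pos {V : List Int} (h : CornerOf V) : ∀ v ∈ V, 1 ≤ v := by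
  obtain ⟨m, hm, _, hpm⟩ := h
  intro v hv
  have hvM := hpm.mem_iff.mp hv
  simp only [List.mem_cons, List.not_mem_nil, or_false] at hvM
  rcases hvM with rfl | rfl | rfl | rfl <;> omega

theorem a_core_iff (a b c d : Int) :
    ((let vals := PySem.List.sorted [a, b, c, d] (fun x => x) false
      let v0 := PySem.List.pyGetD vals 0 0
      if v0 < 1 then false
      else decide (vals = [v0, v0 + 1, v0 + 3, v0 + 4]) &&
           decide (PySem.Int.mod v0 3 = 1 ∨ PySem.Int.mod v0 3 = 2)) = true)
    ↔ CornerOf [a, b, c, d] := by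
  have hperm : (PySem.List.sorted [a, b, c, d] (fun x => x) false).Perm [a, b, c, d] :=
    PySem.List.sorted_perm _ _ _
  simp only []
  constructor
  · intro h
    split_ifs at h with hlt
    rw [Bool.and_eq_true, decide_eq_true_iff, decide_eq_true_iff] at h
    exact ⟨_, by omega, h.2, by rw [← h.1]; exact hperm.symm⟩
  · rintro ⟨m, hm, hmod, hp⟩
    have hpl : List.Pairwise (fun x y : Int => x < y) [m, m + 1, m + 3, m + 4] := by
      simp [List.pairwise_cons]
    have hsorted : PySem.List.sorted [a, b, c, d] (fun x => x) false = [m, m + 1, m + 3, m + 4] :=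
      PySem.List.sorted_eq_of_perm_of_pairwise_lt _ _ _ hp.symm hpl
    have hmod' : m % 3 = 1 ∨ m % 3 = 2 := by
      rwa [PySem.Int.mod_eq_emod_of_pos (by norm_num : (0:Int) < 3)] at hmod
    rw [hsorted]
    simp only [PySem.List.pyGetD_zero_cons]
    rw [if_neg (by omega)]
    simp [hmod']

theorem b_core_iff (a b c d : Int) (ha : 1 ≤ a) (hb : 1 ≤ b) (hc : 1 ≤ c) (hd : 1 ≤ d) :
    ((let nums := PySem.Set.ofList [a, b, c, d]
      if PySem.Set.len nums ≠ 4 then false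
      else
        let r := (PySem.List.min? (nums.map fun n => PySem.Int.floordiv (n - 1) 3) (fun x => x)).getD 0
        let c' := (PySem.List.min? (nums.map fun n => PySem.Int.mod (n - 1) 3) (fun x => x)).getD 0
        decide (c' ≠ 2) &&
          ([((0:Int),(0:Int)), (0,1), (1,0), (1,1)].all fun p =>
            PySem.Set.contains nums (3 * (r + p.1) + (c' + p.2) + 1))) = true)
    ↔ CornerOf [a, b, c, d] := by
  have fd : ∀ x : Int, PySem.Int.floordiv x 3 = x / 3 :=
    fun x => PySem.Int.floordiv_eq_ediv_of_pos (by norm_num)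
  have md : ∀ x : Int, PySem.Int.mod x 3 = x % 3 :=
    fun x => PySem.Int.mod_eq_emod_of_pos (by norm_num)
  have hmem : ∀ x : Int, x ∈ PySem.Set.ofList [a, b, c, d] ↔ x ∈ [a, b, c, d] :=
    fun x => PySem.Set.mem_ofList _ x
  have hnodup : (PySem.Set.ofList [a, b, c, d]).Nodup := PySem.Set.nodup_ofList _
  have hpos : ∀ v ∈ PySem.Set.ofList [a, b, c, d], 1 ≤ v := by
    intro v hv
    have := (hmem v).mp hv
    simp only [List.mem_cons, List.not_mem_nil, or_false] at this
    rcases this with rfl | rfl | rfl | rfl <;> omega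
  have hlenS : PySem.Set.len (PySem.Set.ofList [a, b, c, d]) = ((PySem.Set.ofList [a, b, c, d]).length : Int) := by
    simp [PySem.Set.len]
  simp only []
  by_cases hlen4 : (PySem.Set.ofList [a, b, c, d]).length = 4
  · rw [if_neg (by rw [hlenS]; omega)]
    simp only [List.all_cons, List.all_nil, Bool.and_eq_true, Bool.and_true, decide_eq_true_iff,
      PySem.Set.contains_iff, md, fd]
    constructor
    · rintro ⟨hc2, h00, h01, h10, h11⟩
      have hSne : PySem.Set.ofList [a, b, c, d] ≠ [] := by
        intro h; rw [h] at hlen4; simp at hlen4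
      obtain ⟨r0, hr0⟩ : ∃ r0, (PySem.List.min? (List.map (fun n => (n - 1) / 3)
          (PySem.Set.ofList [a, b, c, d])) fun x => x) = some r0 :=
        Option.ne_none_iff_exists'.mp (by
          rw [Ne, PySem.List.min?_eq_none_iff]; simpa using hSne)
      obtain ⟨c0, hc0⟩ : ∃ c0, (PySem.List.min? (List.map (fun n => (n - 1) % 3)
          (PySem.Set.ofList [a, b, c, d])) fun x => x) = some c0 :=
        Option.ne_none_iff_exists'.mp (by
          rw [Ne, PySem.List.min?_eq_none_iff]; simpa using hSne)
      simp only [hr0, hc0, Option.getD_some] at hc2 h00 h01 h10 h11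
      obtain ⟨v, hvS, hv⟩ := List.mem_map.mp (PySem.List.min?_mem hr0)
      obtain ⟨w, hwS, hw⟩ := List.mem_map.mp (PySem.List.min?_mem hc0)
      have hr0nn : 0 ≤ r0 := by have := hpos v hvS; omega
      have hc0b : 0 ≤ c0 ∧ c0 < 3 := by have := hpos w hwS; omega
      set m : Int := 3 * r0 + c0 + 1 with hmdef
      have k1 : m ∈ PySem.Set.ofList [a, b, c, d] := by
        rw [show m = 3 * (r0 + 0) + (c0 + 0) + 1 by ring]; exact h00
      have k2 : m + 1 ∈ PySem.Set.ofList [a, b, c, d] := by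
        rw [show m + 1 = 3 * (r0 + 0) + (c0 + 1) + 1 by ring]; exact h01
      have k3 : m + 3 ∈ PySem.Set.ofList [a, b, c, d] := by
        rw [show m + 3 = 3 * (r0 + 1) + (c0 + 0) + 1 by ring]; exact h10
      have k4 : m + 4 ∈ PySem.Set.ofList [a, b, c, d] := by
        rw [show m + 4 = 3 * (r0 + 1) + (c0 + 1) + 1 by ring]; exact h11
      have hMnd : List.Nodup [m, m + 1, m + 3, m + 4] := by
        simp only [List.nodup_cons, List.mem_cons, List.not_mem_nil, or_false, List.nodup_nil]
        norm_num
      have hMsub : [m, m + 1, m + 3, m + 4] ⊆ PySem.Set.ofList [a, b, c, d] := by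
        intro x hx
        simp only [List.mem_cons, List.not_mem_nil, or_false] at hx
        rcases hx with rfl | rfl | rfl | rfl
        exacts [k1, k2, k3, k4]
      have hMperm : List.Perm [m, m + 1, m + 3, m + 4] (PySem.Set.ofList [a, b, c, d]) :=
        (hMnd.subperm hMsub).perm_of_length_le (by simp [hlen4])
      have hSV : List.Perm (PySem.Set.ofList [a, b, c, d]) [a, b, c, d] :=
        (hnodup.subperm fun x hx => (hmem x).mp hx).perm_of_length_le (by simp [hlen4])
      refine ⟨m, by omega, ?_, (hMperm.trans hSV).symm⟩
      have : c0 = 0 ∨ c0 = 1 := by omega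
      rcases this with h0 | h0
      · left; rw [md]; omega
      · right; rw [md]; omega
    · rintro ⟨m, hm, hmod, hp⟩
      have hmod' : m % 3 = 1 ∨ m % 3 = 2 := by rwa [md] at hmod
      have hSne : PySem.Set.ofList [a, b, c, d] ≠ [] := by
        intro h; rw [h] at hlen4; simp at hlen4
      obtain ⟨r0, hr0⟩ : ∃ r0, (PySem.List.min? (List.map (fun n => (n - 1) / 3)
          (PySem.Set.ofList [a, b, c, d])) fun x => x) = some r0 :=
        Option.ne_none_iff_exists'.mp (by
          rw [Ne, PySem.List.min?_eq_none_iff]; simpa using hSne)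
      obtain ⟨c0, hc0⟩ : ∃ c0, (PySem.List.min? (List.map (fun n => (n - 1) % 3)
          (PySem.Set.ofList [a, b, c, d])) fun x => x) = some c0 :=
        Option.ne_none_iff_exists'.mp (by
          rw [Ne, PySem.List.min?_eq_none_iff]; simpa using hSne)
      have hmemM : ∀ x : Int, x ∈ PySem.Set.ofList [a, b, c, d] ↔ x ∈ [m, m + 1, m + 3, m + 4] := by
        intro x; rw [hmem x, hp.mem_iff]
      have hmM : m ∈ PySem.Set.ofList [a, b, c, d] := (hmemM m).mpr (by simp)
      have hr0le : r0 ≤ (m - 1) / 3 :=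
        PySem.List.min?_isMin hr0 ((m - 1) / 3) (List.mem_map.mpr ⟨m, hmM, rfl⟩)
      have hc0le : c0 ≤ (m - 1) % 3 :=
        PySem.List.min?_isMin hc0 ((m - 1) % 3) (List.mem_map.mpr ⟨m, hmM, rfl⟩)
      obtain ⟨v, hvS, hv⟩ := List.mem_map.mp (PySem.List.min?_mem hr0)
      obtain ⟨w, hwS, hw⟩ := List.mem_map.mp (PySem.List.min?_mem hc0)
      have hvM := (hmemM v).mp hvS
      have hwM := (hmemM w).mp hwS
      simp only [List.mem_cons, List.not_mem_nil, or_false] at hvM hwM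
      have hr0v : r0 = (m - 1) / 3 := by rcases hvM with rfl | rfl | rfl | rfl <;> omega
      have hc0v : c0 = (m - 1) % 3 := by rcases hwM with rfl | rfl | rfl | rfl <;> omega
      simp only [hr0, hc0, Option.getD_some]
      refine ⟨by omega, ?_, ?_, ?_, ?_⟩ <;>
        (rw [hmemM]; simp only [List.mem_cons, List.not_mem_nil, or_false]; omega)
  · rw [if_pos (by rw [hlenS]; omega)]
    constructor
    · intro h
      exact absurd h (by simp)
    · rintro ⟨m, hm, hmod, hp⟩
      exfalso
      apply hlen4
      have hMnd : List.Nodup [m, m + 1, m + 3, m + 4] := by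
        simp only [List.nodup_cons, List.mem_cons, List.not_mem_nil, or_false, List.nodup_nil]
        norm_num
      have hVnd : [a, b, c, d].Nodup := hp.nodup_iff.mpr hMnd
      rw [PySem.Set.ofList_eq_self_of_nodup _ hVnd]
      simp

-- ===== VERDICT (by name: the statement is the Claim_ definition above) =====
theorem is_valid_corner_py_spec : Claim_equal_is_valid_corner_py := by
  intro selection _
  unfold Spec_is_valid_corner_py
  by_cases hlen : selection.length = 4
  · obtain ⟨s0, s1, s2, s3, rfl⟩ : ∃ s0 s1 s2 s3, selection = [s0, s1, s2, s3] := by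
      rcases selection with _ | ⟨s0, _ | ⟨s1, _ | ⟨s2, _ | ⟨s3, _ | ⟨s4, tl⟩⟩⟩⟩⟩ <;>
        simp_all
    have h4 : ¬(([s0, s1, s2, s3] : List String).length ≠ 4) := by simp
    rw [is_valid_corner_py, is_valid_corner_py_alt, if_neg h4, if_neg h4, collect4, map_vfun]
    simp only [List.map_cons, List.map_nil]
    by_cases hge : vfun s0 < 1 ∨ vfun s1 < 1 ∨ vfun s2 < 1 ∨ vfun s3 < 1
    · rw [if_pos hge]
      refine Bool.eq_false_iff.mpr (fun hA => ?_)
      have hC := (a_core_iff (vfun s0) (vfun s1) (vfun s2) (vfun s3)).mp hA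
      have hall := cornerOf_pos hC
      rcases hge with h | h | h | h
      · exact absurd (hall (vfun s0) (by simp)) (by omega)
      · exact absurd (hall (vfun s1) (by simp)) (by omega)
      · exact absurd (hall (vfun s2) (by simp)) (by omega)
      · exact absurd (hall (vfun s3) (by simp)) (by omega)
    · rw [if_neg hge]
      push Not at hge
      obtain ⟨ha, hb, hc, hd⟩ := hge
      exact Bool.eq_iff_iff.mpr
        ((a_core_iff (vfun s0) (vfun s1) (vfun s2) (vfun s3)).trans
          (b_core_iff (vfun s0) (vfun s1) (vfun s2) (vfun s3) ha hb hc hd).symm)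
  · simp [is_valid_corner_py, is_valid_corner_py_alt, hlen]
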